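-- pv_equiv track=rewrite | github.com/qwghlm/WhensMyBus | lib/textparser.py | fix_unknown_tokens
-- ===== SOURCE A (Python) =====
-- def fix_unknown_tokens(tagged_tokens):
--     """
--     Fix tagged tokens that are tagged "UNKNOWN"
--     """
--     # Any Unknown words before the occurrence of the word "Line" must be a Tube line word
--     for i in range(0, first_occurrence_of_tag(tagged_tokens, 'LINE')):
--         if tagged_tokens[i][1] in ('UNKNOWN',):
--             tagged_tokens[i] = (tagged_tokens[i][0], 'TUBE_LINE_WORD')
--
--     # Any Unknown words after the chain of Tube Line words at the start must be a Station word
--     for i in range(last_occurence_of_tag_chain(tagged_tokens, 'TUBE_LINE_WORD') + 1, len(tagged_tokens)):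
--         if tagged_tokens[i][1] in ('UNKNOWN', 'TUBE_LINE_WORD'):
--             tagged_tokens[i] = (tagged_tokens[i][0], 'STATION_WORD')
--     return tagged_tokens
--
-- def first_occurrence_of_tag(sequence, tag_type_or_types):
--     """
--     Returns the position of the first tag with type tag_type_or_types in the sequence
--
--     tag_type_or_types can be a string (exact match) or a list of strings (exact match any in the list)
--     """
--     for i in range(0, len(sequence)):
--         if isinstance(tag_type_or_types, tuple) and sequence[i][1] in tag_type_or_types:
--             return i
--         elif isinstance(tag_type_or_types, str) and sequence[i][1] == tag_type_or_types:
--             return i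
--     return -1
--
-- def last_occurence_of_tag_chain(sequence, tag_type):
--     """
--     Takes a sequence of tags. Assuming the first N tags of the sequence are all of the type tag_type, it will return
--     the index of the last such tag in that chain, i.e. N-1
--
--     If the first element of the sequence is not of type tag_type, it will return -1
--     """
--     for i in range(0, len(sequence)):
--         if sequence[i][1] != tag_type:
--             return i - 1
--     return len(sequence)
-- ===== SOURCE B (Python) =====
-- def fix_unknown_tokens(tagged_tokens):
--     """
--     Fix tagged tokens that are tagged "UNKNOWN"
--     """
--     # index of the first 'LINE' tag, -1 if none
--     line_idx = -1
--     for i, (_, tag) in enumerate(tagged_tokens):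
--         if tag == 'LINE':
--             line_idx = i
--             break
--     # single pass: extend the leading tube-line chain, then station-tag the rest
--     in_chain = True
--     for i, (word, tag) in enumerate(tagged_tokens):
--         if in_chain and (tag == 'TUBE_LINE_WORD' or (tag == 'UNKNOWN' and i < line_idx)):
--             if tag == 'UNKNOWN':
--                 tagged_tokens[i] = (word, 'TUBE_LINE_WORD')
--         else:
--             in_chain = False
--             if tag in ('UNKNOWN', 'TUBE_LINE_WORD'):
--                 tagged_tokens[i] = (word, 'STATION_WORD')
--     return tagged_tokens
-- ===== Notes on version B (the rewrite author's own statement) =====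
-- stated objective: alternative
-- what changed: Replaces A's two helper scans plus two index-range mutation loops with one forward pass carrying an in-chain flag (only the first-LINE index is precomputed), promoting or station-tagging each token as it goes.
import Mathlib
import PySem

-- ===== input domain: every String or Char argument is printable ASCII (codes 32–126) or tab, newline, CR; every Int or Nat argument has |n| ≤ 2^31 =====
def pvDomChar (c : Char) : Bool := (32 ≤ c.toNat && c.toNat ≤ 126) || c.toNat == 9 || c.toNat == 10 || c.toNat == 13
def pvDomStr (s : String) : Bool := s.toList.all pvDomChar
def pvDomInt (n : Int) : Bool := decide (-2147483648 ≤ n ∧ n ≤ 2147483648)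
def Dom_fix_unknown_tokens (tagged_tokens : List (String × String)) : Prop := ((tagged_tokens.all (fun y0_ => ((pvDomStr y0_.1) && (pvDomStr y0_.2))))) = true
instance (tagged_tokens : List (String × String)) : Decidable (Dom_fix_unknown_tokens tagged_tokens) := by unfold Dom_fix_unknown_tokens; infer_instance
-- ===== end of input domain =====

-- B re-tags in one forward pass with an in-chain flag instead of A's two index-range
-- passes driven by two helper scans; return value only (the Python versions mutate in place).

-- ===== PORT A =====
-- first_occurrence_of_tag, called with the string 'LINE' (the isinstance-tuple branch
-- never fires for a string argument); index-scan ported as structural recursion with an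
-- index accumulator.
def firstOccAux : List (String × String) → String → Int → Int
  | [], _, _ => -1
  | x :: xs, t, i => if x.2 = t then i else firstOccAux xs t (i + 1)

-- last_occurence_of_tag_chain: returns i-1 at the first non-matching tag, len otherwise.
def lastChainAux : List (String × String) → String → Int → Int
  | [], _, i => i
  | x :: xs, t, i => if x.2 ≠ t then i - 1 else lastChainAux xs t (i + 1)

-- first in-place loop: for i in range(0, lineIdx), promote UNKNOWN to TUBE_LINE_WORD
def promoteAux : List (String × String) → Int → Int → List (String × String)
  | [], _, _ => []
  | x :: xs, i, m =>
      (if i < m ∧ x.2 = "UNKNOWN" then (x.1, "TUBE_LINE_WORD") else x) :: promoteAux xs (i + 1) m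

-- second in-place loop: for i in range(chainEnd+1, len), re-tag UNKNOWN/TUBE_LINE_WORD
def stationAux : List (String × String) → Int → Int → List (String × String)
  | [], _, _ => []
  | x :: xs, i, m =>
      (if m + 1 ≤ i ∧ (x.2 = "UNKNOWN" ∨ x.2 = "TUBE_LINE_WORD") then (x.1, "STATION_WORD") else x)
        :: stationAux xs (i + 1) m

def fix_unknown_tokens (tagged_tokens : List (String × String)) : List (String × String) :=
  let step1 := promoteAux tagged_tokens 0 (firstOccAux tagged_tokens "LINE" 0)
  stationAux step1 0 (lastChainAux step1 "TUBE_LINE_WORD" 0)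

-- ===== PORT B =====
-- index of the first 'LINE' tag, -1 if none
def altLineIdx : List (String × String) → Int → Int
  | [], _ => -1
  | x :: xs, i => if x.2 = "LINE" then i else altLineIdx xs (i + 1)

-- single pass with the in_chain flag
def altGo : List (String × String) → Int → Int → Bool → List (String × String)
  | [], _, _, _ => []
  | (w, t) :: xs, i, li, inChain =>
      if inChain = true ∧ (t = "TUBE_LINE_WORD" ∨ (t = "UNKNOWN" ∧ i < li)) then
        (if t = "UNKNOWN" then (w, "TUBE_LINE_WORD") else (w, t)) :: altGo xs (i + 1) li true
      else
        (if t = "UNKNOWN" ∨ t = "TUBE_LINE_WORD" then (w, "STATION_WORD") else (w, t))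
          :: altGo xs (i + 1) li false

def fix_unknown_tokens_alt (tagged_tokens : List (String × String)) : List (String × String) :=
  altGo tagged_tokens 0 (altLineIdx tagged_tokens 0) true

-- ===== PRECONDITION & SPEC =====
def Spec_fix_unknown_tokens (tagged_tokens : List (String × String)) (out : List (String × String)) : Prop := out = fix_unknown_tokens_alt tagged_tokens
instance (tagged_tokens : List (String × String)) (out : List (String × String)) : Decidable (Spec_fix_unknown_tokens tagged_tokens out) := by unfold Spec_fix_unknown_tokens; infer_instance

-- ===== CLAIM (what is proved, stated in full; the proofs are below) =====
def Claim_equal_fix_unknown_tokens : Prop := ∀ (tagged_tokens : List (String × String)), Dom_fix_unknown_tokens tagged_tokens → Spec_fix_unknown_tokens tagged_tokens (fix_unknown_tokens tagged_tokens)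

-- ===== LEMMAS AND PROOFS =====

theorem firstOcc_eq_altLineIdx (ts : List (String × String)) (i : Int) :
    firstOccAux ts "LINE" i = altLineIdx ts i := by
  induction ts generalizing i with
  | nil => rfl
  | cons x xs ih => simp only [firstOccAux, altLineIdx, ih]

theorem lastChain_ge (ts : List (String × String)) (t : String) (i : Int) :
    i - 1 ≤ lastChainAux ts t i := by
  induction ts generalizing i with
  | nil => simp only [lastChainAux]; omega
  | cons x xs ih =>
    simp only [lastChainAux]
    split
    · omega
    · have := ih (i + 1); omega

-- out-of-chain region: after the chain has broken, A's remaining promote-then-station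
-- rewriting agrees with B's station branch.
theorem station_eq_altGo_false (ts : List (String × String)) (i li ce : Int) (h : ce < i) :
    stationAux (promoteAux ts i li) i ce = altGo ts i li false := by
  induction ts generalizing i with
  | nil => rfl
  | cons x xs ih =>
    obtain ⟨w, t⟩ := x
    simp only [altGo]
    rw [if_neg (fun hx => Bool.false_ne_true hx.1)]
    simp only [promoteAux, stationAux]
    congr 1
    · have hle : ce + 1 ≤ i := by omega
      by_cases hu : t = "UNKNOWN" <;> by_cases hlt : i < li <;>
        simp [hu, hlt, hle]
    · exact ih (i + 1) (by omega)

-- in-chain region: A applied to the suffix starting at index i, with the chain end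
-- recomputed from that suffix, agrees with B's in-chain pass.
theorem main_eq (ts : List (String × String)) (i li : Int) :
    stationAux (promoteAux ts i li) i (lastChainAux (promoteAux ts i li) "TUBE_LINE_WORD" i)
      = altGo ts i li true := by
  induction ts generalizing i with
  | nil => rfl
  | cons x xs ih =>
    obtain ⟨w, t⟩ := x
    by_cases hc : t = "TUBE_LINE_WORD" ∨ (t = "UNKNOWN" ∧ i < li)
    · -- chain continues through this token
      have h1 : (if i < li ∧ t = "UNKNOWN" then ((w, "TUBE_LINE_WORD") : String × String) else (w, t)).2 = "TUBE_LINE_WORD" := by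
        rcases hc with h | ⟨h1, h2⟩ <;> split_ifs <;> simp_all
      have hge := lastChain_ge (promoteAux xs (i + 1) li) "TUBE_LINE_WORD" (i + 1)
      simp only [altGo]
      rw [if_pos ⟨trivial, hc⟩]
      simp only [promoteAux]
      rw [show lastChainAux
            ((if i < li ∧ t = "UNKNOWN" then ((w, "TUBE_LINE_WORD") : String × String) else (w, t))
              :: promoteAux xs (i + 1) li) "TUBE_LINE_WORD" i
          = lastChainAux (promoteAux xs (i + 1) li) "TUBE_LINE_WORD" (i + 1) from by
        simp [lastChainAux, h1]]
      simp only [stationAux]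
      rw [if_neg (fun hx => absurd hx.1 (by omega))]
      congr 1
      · rcases hc with h | ⟨h1', h2'⟩ <;> simp [*]
      · exact ih (i + 1)
    · -- chain breaks at this token
      have ht : t ≠ "TUBE_LINE_WORD" := fun h => hc (Or.inl h)
      have hp : (if i < li ∧ t = "UNKNOWN" then ((w, "TUBE_LINE_WORD") : String × String) else (w, t)) = (w, t) := by
        split_ifs with h
        · exact absurd (Or.inr ⟨h.2, h.1⟩) hc
        · rfl
      simp only [altGo]
      rw [if_neg (fun hx => hc hx.2)]
      simp only [promoteAux, hp]
      rw [show lastChainAux ((w, t) :: promoteAux xs (i + 1) li) "TUBE_LINE_WORD" i = i - 1 from by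
        simp [lastChainAux, ht]]
      simp only [stationAux]
      congr 1
      · by_cases hu : t = "UNKNOWN" <;>
          simp [hu, ht]
      · rw [station_eq_altGo_false xs (i + 1) li (i - 1) (by omega)]

-- ===== VERDICT (by name: the statement is the Claim_ definition above) =====
theorem fix_unknown_tokens_spec : Claim_equal_fix_unknown_tokens := by
  intro ts _
  unfold Spec_fix_unknown_tokens fix_unknown_tokens fix_unknown_tokens_alt
  rw [firstOcc_eq_altLineIdx]
  exact main_eq ts 0 (altLineIdx ts 0)
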